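-- pv_equiv track=rewrite | github.com/xinghun61/infra | infra_libs/ts_mon/common/metrics.py | _running_zero_generator
-- ===== SOURCE A (Python) =====
-- def _running_zero_generator(iterable):
--   """Compresses sequences of zeroes in the iterable into negative zero counts.
--
--   For example an input of [1, 0, 0, 0, 2] is converted to [1, -3, 2].
--   """
--
--   count = 0
--
--   for value in iterable:
--     if value == 0:
--       count += 1
--     else:
--       if count != 0:
--         yield -count
--         count = 0
--       yield value
-- ===== SOURCE B (Python) =====
-- def _running_zero_generator(iterable):
--   """Compresses sequences of zeroes in the iterable into negative zero counts.
--
--   Run-based reimplementation: scan by runs of zeros with an index, emitting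
--   the negated run length followed by the next non-zero element; a trailing
--   zero run is never emitted (it hits the end of the list).
--   """
--   xs = list(iterable)
--   n = len(xs)
--   i = 0
--   while i < n:
--     j = i
--     while j < n and xs[j] == 0:
--       j += 1
--     if j == n:
--       return  # trailing run of zeros is dropped
--     if j > i:
--       yield i - j  # -(length of the zero run)
--     yield xs[j]
--     i = j + 1
-- ===== Notes on version B (the rewrite author's own statement) =====
-- stated objective: alternative
-- what changed: Replaces the per-element loop carrying a pending zero counter with an index-based run scanner: an inner loop finds each maximal run of zeros and the run is emitted as a whole (negated length, then the following non-zero element), returning early at a trailing zero run.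
import Mathlib
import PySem

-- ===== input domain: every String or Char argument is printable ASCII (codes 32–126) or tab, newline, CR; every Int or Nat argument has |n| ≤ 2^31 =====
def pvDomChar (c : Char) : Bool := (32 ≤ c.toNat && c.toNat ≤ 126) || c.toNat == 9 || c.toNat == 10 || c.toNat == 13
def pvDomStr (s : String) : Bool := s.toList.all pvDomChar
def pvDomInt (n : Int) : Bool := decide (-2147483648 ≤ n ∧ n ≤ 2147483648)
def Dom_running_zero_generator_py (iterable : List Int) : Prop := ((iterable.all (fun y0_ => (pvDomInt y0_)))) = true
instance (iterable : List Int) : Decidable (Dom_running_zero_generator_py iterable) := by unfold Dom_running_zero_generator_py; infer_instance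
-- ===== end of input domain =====

-- B replaces A's per-element loop carrying a pending zero counter with a run scanner that
-- consumes each maximal zero run at once; alternative decomposition, same O(n) cost.

-- ===== PORT A =====
-- A's generator loop: 'count' pending zeros; on a non-zero value flush -count, then the value.
def pvGoA (count : Int) (xs : List Int) : List Int :=
  match xs with
  | [] => []
  | value :: t =>
    if value == 0 then pvGoA (count + 1) t
    else (if count != 0 then [-count] else []) ++ value :: pvGoA 0 t

def running_zero_generator_py (iterable : List Int) : List Int :=
  pvGoA 0 iterable

-- ===== PORT B =====
-- Source B's run scanner: the inner while advancing j over zeros is the leading zero run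
-- (takeWhile); if the run reaches the end of the list, stop (trailing zeros dropped);
-- otherwise yield -(run length) when the run is nonempty, then the element after it,
-- and continue with the rest.
def pvRunB (xs : List Int) : List Int :=
  let z := (xs.takeWhile (fun v => v == 0)).length
  match h : xs.drop z with
  | [] => []  -- j == n: trailing run of zeros is dropped
  | v :: t => (if z > 0 then [-(z : Int)] else []) ++ v :: pvRunB t
termination_by xs.length
decreasing_by
  have := congrArg List.length h
  simp [List.length_drop] at this
  omega

def running_zero_generator_py_alt (iterable : List Int) : List Int :=
  pvRunB iterable

-- ===== PRECONDITION & SPEC =====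
def Spec_running_zero_generator_py (iterable : List Int) (out : List Int) : Prop := out = running_zero_generator_py_alt iterable
instance (iterable : List Int) (out : List Int) : Decidable (Spec_running_zero_generator_py iterable out) := by unfold Spec_running_zero_generator_py; infer_instance

-- ===== CLAIM (what is proved, stated in full; the proofs are below) =====
def Claim_equal_running_zero_generator_py : Prop := ∀ (iterable : List Int), Dom_running_zero_generator_py iterable → Spec_running_zero_generator_py iterable (running_zero_generator_py iterable)

-- ===== LEMMAS AND PROOFS =====

-- A's loop with the pending counter as a Nat (the counter only ever holds a zero count).
def pvG (c : Nat) (xs : List Int) : List Int :=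
  match xs with
  | [] => []
  | v :: t =>
    if v = 0 then pvG (c + 1) t
    else (if c ≠ 0 then [-(c : Int)] else []) ++ v :: pvG 0 t

-- one unfolding of the run scanner, with a pending count c merged into the leading run
def pvStep (c : Nat) (xs : List Int) : List Int :=
  let z := (xs.takeWhile (fun v => v == 0)).length
  match xs.drop z with
  | [] => []
  | v :: t => (if c + z ≠ 0 then [-((c + z : Nat) : Int)] else []) ++ v :: pvRunB t

theorem pvGoA_eq_pvG : ∀ (xs : List Int) (c : Nat), pvGoA (c : Int) xs = pvG c xs := by
  intro xs
  induction xs with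
  | nil => intro c; simp [pvGoA, pvG]
  | cons v t ih =>
    intro c
    by_cases hv : v = 0
    · subst hv
      simpa [pvGoA, pvG, Int.natCast_add] using ih (c + 1)
    · have h0 : pvGoA 0 t = pvG 0 t := by simpa using ih 0
      have hc : ((c : Int) != 0) = decide (c ≠ 0) := by
        by_cases h : c = 0 <;> simp [h]
      simp [pvGoA, pvG, hv, h0, hc]

theorem pvRunB_eq_step (xs : List Int) : pvRunB xs = pvStep 0 xs := by
  rw [pvRunB.eq_def]
  unfold pvStep
  dsimp only
  split
  · rename_i heq
    simp only [heq]
  · rename_i v t heq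
    simp only [heq, Nat.zero_add]
    congr 1
    by_cases hz : (xs.takeWhile (fun v => v == 0)).length = 0 <;> simp [hz]

theorem pvG_eq_step : ∀ (n : Nat) (xs : List Int), xs.length ≤ n → ∀ (c : Nat), pvG c xs = pvStep c xs := by
  intro n
  induction n with
  | zero =>
    intro xs hlen c
    have hx : xs = [] := List.eq_nil_of_length_eq_zero (Nat.le_zero.mp hlen)
    subst hx
    simp [pvG, pvStep]
  | succ n ih =>
    intro xs hlen c
    match xs with
    | [] => simp [pvG, pvStep]
    | v :: t =>
      have ht : t.length ≤ n := by
        simp only [List.length_cons] at hlen; omega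
      by_cases hv : v = 0
      · subst hv
        rw [show pvG c (0 :: t) = pvG (c + 1) t from by simp [pvG], ih t ht (c + 1)]
        unfold pvStep
        dsimp only
        have htw : (((0 : Int) :: t).takeWhile (fun v => v == 0)).length
            = (t.takeWhile (fun v => v == 0)).length + 1 := by
          simp [List.takeWhile]
        rw [htw]
        simp only [List.drop_succ_cons]
        cases hdrop : t.drop (t.takeWhile (fun v => v == 0)).length with
        | nil => rfl
        | cons w u =>
          have h1 : (c + ((t.takeWhile (fun v => v == 0)).length + 1) ≠ 0) = True := by
            simp
          have h2 : (c + 1 + (t.takeWhile (fun v => v == 0)).length ≠ 0) = True := by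
            simp
          simp only [h1, h2, if_true]
          have : c + ((t.takeWhile (fun v => v == 0)).length + 1)
              = c + 1 + (t.takeWhile (fun v => v == 0)).length := by omega
          rw [this]
      · have hG0 : pvG 0 t = pvRunB t := by
          rw [ih t ht 0, ← pvRunB_eq_step]
        have htw : ((v :: t).takeWhile (fun v => v == 0)) = [] := by
          simp [hv]
        rw [show pvG c (v :: t) = (if c ≠ 0 then [-(c : Int)] else []) ++ v :: pvG 0 t from by
          simp [pvG, hv]]
        unfold pvStep
        rw [htw]
        simp only [List.length_nil, List.drop_zero, Nat.add_zero]
        rw [hG0]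

-- ===== VERDICT (by name: the statement is the Claim_ definition above) =====
theorem running_zero_generator_py_spec : Claim_equal_running_zero_generator_py := by
  intro xs _
  show running_zero_generator_py xs = running_zero_generator_py_alt xs
  unfold running_zero_generator_py running_zero_generator_py_alt
  rw [show (0 : Int) = ((0 : Nat) : Int) from rfl, pvGoA_eq_pvG,
    pvG_eq_step xs.length xs le_rfl, ← pvRunB_eq_step]
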